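-- pv_equiv track=rewrite | github.com/ricbit/advent-of-code | 2017/adv07-r.py | check
-- ===== SOURCE A (Python) =====
-- from collections import deque
--
-- def toposort(graph):
--   front = deque([k for k, v in graph.items() if not v[1]])
--   count = {k: len(v[1]) for k, v in graph.items()}
--   reverse = {d: src for src, (_, dst) in graph.items() for d in dst}
--   while front:
--     yield (src := front.popleft())
--     dst = reverse.get(src, None)
--     if dst is not None:
--       count[dst] -= 1
--       if not count[dst]:
--         front.append(dst)
--
-- def check(graph):
--   weight = {}
--   for node in toposort(graph):
--     if not graph[node][1]:
--       weight[node] = graph[node][0]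
--     else:
--       sons = [weight[s] for s in graph[node][1]]
--       if len(set(sons)) != 1:
--         return False
--       weight[node] = graph[node][0] + sum(sons)
--   return True
-- ===== SOURCE B (Python) =====
-- def check(graph):
--   # repeated relaxation sweeps: resolve any node whose children all have a
--   # weight, flag an imbalance whenever a resolved node's children differ
--   weight = {}
--   balanced = True
--   progress = True
--   while progress:
--     progress = False
--     for node, (w, kids) in graph.items():
--       if node not in weight and all(k in weight for k in kids):
--         sons = [weight[k] for k in kids]
--         if kids and len(set(sons)) != 1:
--           balanced = False
--         weight[node] = w + sum(sons)
--         progress = True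
--   return balanced
-- ===== Notes on version B (the rewrite author's own statement) =====
-- stated objective: simpler
-- what changed: Replaces the toposort generator with its deque, in-degree counter and reverse-edge map by a plain fixed-point loop that repeatedly sweeps the graph resolving any node whose children all have weights; Pre_ excludes association lists with duplicate keys (the Python dict and the list denote different graphs) and graphs where some key occurs more than once as a child (A's reverse map keeps a single parent slot per child, so which sibling sets A checks there is an artefact of its implementation).
import Mathlib
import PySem

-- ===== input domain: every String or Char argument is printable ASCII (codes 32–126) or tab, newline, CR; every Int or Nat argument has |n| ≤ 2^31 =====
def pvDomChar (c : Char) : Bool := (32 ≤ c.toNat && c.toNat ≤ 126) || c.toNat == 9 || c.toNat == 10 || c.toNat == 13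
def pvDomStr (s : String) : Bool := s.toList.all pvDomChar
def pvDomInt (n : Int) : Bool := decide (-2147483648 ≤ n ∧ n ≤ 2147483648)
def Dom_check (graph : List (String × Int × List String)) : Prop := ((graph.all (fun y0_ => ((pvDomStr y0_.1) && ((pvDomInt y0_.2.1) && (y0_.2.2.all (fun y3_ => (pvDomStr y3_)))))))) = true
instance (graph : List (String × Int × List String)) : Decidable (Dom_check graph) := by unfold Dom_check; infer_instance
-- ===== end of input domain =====

-- B replaces A's toposort generator (deque + in-degree counts + reverse-edge dict) by a
-- plain fixed-point loop of relaxation sweeps; equal return value on the stated Pre_.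

-- ===== PORT A =====
-- reverse = {d: src for src, (_, dst) in graph.items() for d in dst}
def pvRevA (g : List (String × Int × List String)) : PySem.Dict String String :=
  g.foldl (fun d p => p.2.2.foldl (fun d c => d.insert c p.1) d) PySem.Dict.empty

-- count = {k: len(v[1]) for k, v in graph.items()}
def pvCountA (g : List (String × Int × List String)) : PySem.Dict String Int :=
  g.foldl (fun d p => d.insert p.1 ((p.2.2.length : Int))) PySem.Dict.empty

-- the while-loop of toposort, collecting the yielded nodes; fuel only makes the
-- recursion structural (2*len(graph)+1 is proved sufficient: each iteration pops once,
-- and every node is enqueued at most once)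
def pvTopoA (rev : PySem.Dict String String) :
    Nat → List String → PySem.Dict String Int → List String → List String
  | 0, _, _, acc => acc
  | _ + 1, [], _, acc => acc
  | fuel + 1, src :: front, count, acc =>
      match rev.get? src with
      | none => pvTopoA rev fuel front count (acc ++ [src])
      | some dst =>
          let c := count.getD dst 0 - 1
          pvTopoA rev fuel (if c = 0 then front ++ [dst] else front)
            (count.insert dst c) (acc ++ [src])

-- the body of check, folding over the yielded nodes with the weight dict
def pvCheckLoopA (g : List (String × Int × List String)) :
    List String → PySem.Dict String Int → Bool
  | [], _ => true
  | node :: rest, weight =>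
      let wc := (List.lookup node g).getD (0, [])
      if wc.2 = [] then pvCheckLoopA g rest (weight.insert node wc.1)
      else
        let sons := wc.2.map (fun s => weight.getD s 0)   -- weight[s]: never a KeyError here
        if (PySem.Set.ofList sons).length ≠ 1 then false
        else pvCheckLoopA g rest (weight.insert node (wc.1 + sons.sum))

def check (graph : List (String × Int × List String)) : Bool :=
  pvCheckLoopA graph
    (pvTopoA (pvRevA graph) (2 * graph.length + 1)
      ((graph.filter (fun p => p.2.2.isEmpty)).map (·.1)) (pvCountA graph) [])
    PySem.Dict.empty

-- ===== PORT B =====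
-- one item of the inner for-loop: state (weight, balanced, progress)
def pvPassStep (st : PySem.Dict String Int × Bool × Bool)
    (p : String × Int × List String) : PySem.Dict String Int × Bool × Bool :=
  if st.1.get? p.1 = none ∧ p.2.2.all (fun k => (st.1.get? k).isSome) = true then
    let sons := p.2.2.map (fun k => st.1.getD k 0)  -- weight[k]: membership was just checked
    (st.1.insert p.1 (p.2.1 + sons.sum),
     (if p.2.2 ≠ [] ∧ (PySem.Set.ofList sons).length ≠ 1 then false else st.2.1),
     true)
  else st

-- the while-progress loop; fuel only makes it structural (len(graph)+1 rounds are
-- proved sufficient: every round with progress resolves at least one new key)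
def pvRoundsB (g : List (String × Int × List String)) :
    Nat → PySem.Dict String Int × Bool → PySem.Dict String Int × Bool
  | 0, st => st
  | fuel + 1, st =>
      match g.foldl pvPassStep (st.1, st.2, false) with
      | (wt, bal, true) => pvRoundsB g fuel (wt, bal)
      | (wt, bal, false) => (wt, bal)

def check_alt (graph : List (String × Int × List String)) : Bool :=
  (pvRoundsB graph (graph.length + 1) (PySem.Dict.empty, true)).2

-- ===== PRECONDITION & SPEC =====
-- Pre_ excludes association lists with duplicate keys (the Python dict and the list
-- denote different graphs) and graphs in which some key occurs more than once as a
-- child (A's reverse map keeps a single parent slot per child, so which sibling sets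
-- A checks there is an artefact of its implementation).
def Pre_check (graph : List (String × Int × List String)) : Prop :=
  (graph.map (·.1)).Nodup ∧
  ∀ n ∈ graph.map (·.1), (graph.flatMap (fun p => p.2.2)).count n ≤ 1
instance (graph : List (String × Int × List String)) : Decidable (Pre_check graph) := by
  unfold Pre_check; infer_instance

def pvWitness_check : (List (String × Int × List String)) :=
  [("a", 3, ["b", "c"]), ("b", 1, []), ("c", 1, [])]

def Spec_check (graph : List (String × Int × List String)) (out : Bool) : Prop := out = check_alt graph
instance (graph : List (String × Int × List String)) (out : Bool) : Decidable (Spec_check graph out) := by unfold Spec_check; infer_instance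

-- ===== CLAIM (what is proved, stated in full; the proofs are below) =====
def Claim_equal_check : Prop := ∀ (graph : List (String × Int × List String)), Dom_check graph → Pre_check graph → Spec_check graph (check graph)

-- ===== LEMMAS AND PROOFS =====

-- the last-listed parent of d (what A's reverse dict records)
def pvLastPar (g : List (String × Int × List String)) (d : String) : Option String :=
  (g.reverse.find? (fun p => p.2.2.contains d)).map (·.1)

-- step function of pvRevA
theorem inner_fold_get (l : List String) (v : String) :
    ∀ (dd : PySem.Dict String String) (d : String),
    (l.foldl (fun dd c => dd.insert c v) dd).get? d
      = if d ∈ l then some v else dd.get? d := by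
  induction l with
  | nil => intro dd d; simp
  | cons c cs ih =>
    intro dd d
    simp only [List.foldl_cons, ih]
    by_cases h1 : d ∈ cs
    · simp [h1, List.mem_cons]
    · by_cases h2 : d = c
      · subst h2; simp [h1, PySem.Dict.get?_insert_self]
      · simp only [h1, List.mem_cons, h2, false_or, if_neg]
        rw [if_neg (by simp [h1, h2])]
        exact PySem.Dict.get?_insert_of_ne _ _ h2

theorem lastPar_cons (p : String × Int × List String) (rest : List (String × Int × List String)) (d : String) :
    pvLastPar (p :: rest) d
      = match pvLastPar rest d with
        | some s => some s
        | none => if d ∈ p.2.2 then some p.1 else none := by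
  unfold pvLastPar
  simp only [List.reverse_cons, List.find?_append]
  cases h : rest.reverse.find? (fun q => q.2.2.contains d) with
  | some q => simp [h, Option.orElse]
  | none =>
    by_cases hd : d ∈ p.2.2
    · simp [h, hd, Option.orElse, List.find?]
    · simp [h, hd, Option.orElse, List.find?]

theorem revA_get (g : List (String × Int × List String)) :
    ∀ (init : PySem.Dict String String) (d : String),
    (g.foldl (fun dd p => p.2.2.foldl (fun dd c => dd.insert c p.1) dd) init).get? d
      = match pvLastPar g d with
        | some s => some s
        | none => init.get? d := by
  induction g with
  | nil => intro init d; simp [pvLastPar]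
  | cons p rest ih =>
    intro init d
    simp only [List.foldl_cons, ih, lastPar_cons]
    cases h : pvLastPar rest d with
    | some s => simp
    | none =>
      by_cases hd : d ∈ p.2.2 <;> simp [hd, inner_fold_get]

def pvWt (g : List (String × Int × List String)) : Nat → String → Option Int
  | 0, _ => none
  | k + 1, n =>
      (List.lookup n g).bind (fun wc =>
        if wc.2 = [] then some wc.1
        else if wc.2.Nodup ∧ ∀ d ∈ wc.2, (List.lookup d g).isSome = true ∧ pvLastPar g d = some n then
          if wc.2.all (fun d => (pvWt g k d).isSome) then
            some (wc.1 + (wc.2.map (fun d => (pvWt g k d).getD 0)).sum)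
          else none
        else none)

def Wrel (g : List (String × Int × List String)) (n : String) (w : Int) : Prop :=
  ∃ k, pvWt g k n = some w

-- membership in keys vs lookup
theorem lookup_isSome_iff (g : List (String × Int × List String)) (n : String) :
    (List.lookup n g).isSome = true ↔ n ∈ g.map (·.1) := by
  induction g with
  | nil => simp [List.lookup]
  | cons p rest ih =>
    by_cases h : n = p.1
    · subst h; simp [List.lookup]
    · have hb : (n == p.1) = false := by simpa using h
      simp only [List.lookup, hb, List.map_cons, List.mem_cons]
      simp [ih, h]

theorem mem_of_lookup_eq_some (g : List (String × Int × List String)) (n : String)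
    (wc : Int × List String) (h : List.lookup n g = some wc) : (n, wc) ∈ g := by
  induction g with
  | nil => simp [List.lookup] at h
  | cons p rest ih =>
    by_cases hn : n = p.1
    · subst hn
      simp only [List.lookup, BEq.rfl] at h
      cases h; exact List.mem_cons_self ..
    · have hb : (n == p.1) = false := by simpa using hn
      simp only [List.lookup, hb] at h
      exact List.mem_cons_of_mem _ (ih h)

theorem lookup_eq_some_of_mem_nodup (g : List (String × Int × List String))
    (hnd : (g.map (·.1)).Nodup) (p : String × Int × List String) (hp : p ∈ g) :
    List.lookup p.1 g = some p.2 := by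
  induction g with
  | nil => simp at hp
  | cons q rest ih =>
    simp only [List.map_cons, List.nodup_cons] at hnd
    rcases List.mem_cons.mp hp with h | h
    · subst h; simp [List.lookup]
    · have hne : p.1 ≠ q.1 := by
        intro he; exact hnd.1 (he ▸ List.mem_map_of_mem h)
      have hb : (p.1 == q.1) = false := by simpa using hne
      simp only [List.lookup, hb]
      exact ih hnd.2 h

-- if lastPar d = some u then d is a child of u (unique lookup under nodup keys)
theorem lastPar_mem (g : List (String × Int × List String)) (hnd : (g.map (·.1)).Nodup)
    (d u : String) (h : pvLastPar g d = some u) :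
    ∃ w c, List.lookup u g = some (w, c) ∧ d ∈ c := by
  unfold pvLastPar at h
  cases hf : g.reverse.find? (fun p => p.2.2.contains d) with
  | none => rw [hf] at h; simp at h
  | some p =>
    rw [hf] at h
    simp only [Option.map_some, Option.some.injEq] at h
    have hp : p ∈ g := by
      have := List.mem_of_find?_eq_some hf
      exact List.mem_reverse.mp this
    have hd : d ∈ p.2.2 := by
      have := List.find?_some hf
      simpa using this
    refine ⟨p.2.1, p.2.2, ?_, hd⟩
    have := lookup_eq_some_of_mem_nodup g hnd p hp
    rw [h] at this; simpa using this

theorem pvWt_mono (g : List (String × Int × List String)) :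
    ∀ k' k n w, k ≤ k' → pvWt g k n = some w → pvWt g k' n = some w := by
  intro k'
  induction k' with
  | zero =>
    intro k n w hk h
    cases k with
    | zero => simp [pvWt] at h
    | succ i => omega
  | succ j ih =>
    intro k n w hk h
    cases k with
    | zero => simp [pvWt] at h
    | succ i =>
      have hij : i ≤ j := by omega
      rw [pvWt] at h ⊢
      cases hl : List.lookup n g with
      | none => rw [hl] at h; simp at h
      | some wc =>
        rw [hl] at h
        simp only [Option.bind_some] at h ⊢
        obtain ⟨w0, c⟩ := wc
        simp only at h ⊢
        by_cases hc : c = []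
        · simpa [hc] using h
        · rw [if_neg hc] at h ⊢
          by_cases hcond : c.Nodup ∧ ∀ d ∈ c, (List.lookup d g).isSome = true ∧ pvLastPar g d = some n
          · rw [if_pos hcond] at h ⊢
            by_cases hall : c.all (fun d => (pvWt g i d).isSome) = true
            · rw [if_pos hall] at h
              have hall' : ∀ d ∈ c, ∃ v, pvWt g i d = some v := by
                intro d hd
                have := (List.all_eq_true.mp hall) d hd
                exact Option.isSome_iff_exists.mp (by simpa using this)
              have hup : ∀ d ∈ c, pvWt g j d = pvWt g i d := by
                intro d hd
                obtain ⟨v, hv⟩ := hall' d hd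
                rw [hv, ih i d v hij hv]
              have hall2 : c.all (fun d => (pvWt g j d).isSome) = true := by
                apply List.all_eq_true.mpr
                intro d hd
                rw [hup d hd]
                exact List.all_eq_true.mp hall d hd
              rw [if_pos hall2, ← h]
              congr 1
              have : (c.map fun d => (pvWt g j d).getD 0) = c.map fun d => (pvWt g i d).getD 0 :=
                List.map_congr_left fun d hd => by rw [hup d hd]
              rw [this]
            · rw [if_neg hall] at h; simp at h
          · rw [if_neg hcond] at h; simp at h

theorem Wrel_func (g : List (String × Int × List String)) (n : String) (w w' : Int)
    (h : Wrel g n w) (h' : Wrel g n w') : w = w' := by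
  obtain ⟨k, hk⟩ := h
  obtain ⟨k', hk'⟩ := h'
  have h1 := pvWt_mono g (max k k') k n w (le_max_left _ _) hk
  have h2 := pvWt_mono g (max k k') k' n w' (le_max_right _ _) hk'
  rw [h1] at h2
  exact (Option.some.injEq _ _).mp h2

-- a single fuel bound that resolves a whole list of nodes
theorem maxfuel (g : List (String × Int × List String)) (c : List String)
    (h : ∀ d ∈ c, ∃ w, Wrel g d w) :
    ∃ K, ∀ d ∈ c, (pvWt g K d).isSome = true := by
  induction c with
  | nil => exact ⟨0, by simp⟩
  | cons d ds ih =>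
    obtain ⟨K, hK⟩ := ih (fun x hx => h x (List.mem_cons_of_mem _ hx))
    obtain ⟨w, k, hk⟩ := h d (List.mem_cons_self ..)
    refine ⟨max K k, fun x hx => ?_⟩
    rcases List.mem_cons.mp hx with he | hm
    · subst he
      rw [pvWt_mono g (max K k) k x w (le_max_right _ _) hk]; rfl
    · obtain ⟨v, hv⟩ := Option.isSome_iff_exists.mp (hK x hm)
      rw [pvWt_mono g (max K k) K x v (le_max_left _ _) hv]; rfl

theorem countA_get (g : List (String × Int × List String)) (hnd : (g.map (·.1)).Nodup) :
    ∀ (init : PySem.Dict String Int) (n : String),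
    ((g.foldl (fun d p => d.insert p.1 ((p.2.2.length : Int))) init).get? n)
      = match List.lookup n g with
        | some wc => some ((wc.2.length : Int))
        | none => init.get? n := by
  induction g with
  | nil => intro init n; simp [List.lookup]
  | cons p rest ih =>
    intro init n
    simp only [List.map_cons, List.nodup_cons] at hnd
    simp only [List.foldl_cons, ih hnd.2]
    by_cases hn : n = p.1
    · subst hn
      have hnr : List.lookup p.1 rest = none := by
        cases hl : List.lookup p.1 rest with
        | none => rfl
        | some wc =>
          exact absurd (List.mem_map.mpr
            ⟨(p.1, wc), mem_of_lookup_eq_some rest p.1 wc hl, rfl⟩ :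
              p.1 ∈ rest.map (·.1)) hnd.1
      rw [hnr]
      simp [List.lookup, PySem.Dict.get?_insert_self]
    · have hb : (n == p.1) = false := by simpa using hn
      simp only [List.lookup, hb]
      cases List.lookup n rest with
      | some wc => simp
      | none => simp [PySem.Dict.get?_insert_of_ne _ _ hn]

-- decomposition of acc ++ [x]
theorem append_singleton_decomp {α : Type} (l : List α) (x : α) (pfx : List α) (n : α) (sfx : List α)
    (h : l ++ [x] = pfx ++ n :: sfx) :
    (∃ sfx', l = pfx ++ n :: sfx') ∨ (pfx = l ∧ n = x ∧ sfx = []) := by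
  induction pfx generalizing l with
  | nil =>
    cases l with
    | nil => simp only [List.nil_append] at h; rw [List.cons.injEq] at h; right; exact ⟨rfl, h.1.symm, h.2.symm⟩
    | cons a l' =>
      simp only [List.cons_append, List.nil_append] at h
      rw [List.cons.injEq] at h
      left; exact ⟨l', by simp [h.1, h.2]⟩
  | cons p pfx' ih =>
    cases l with
    | nil =>
      exfalso
      have := congrArg List.length h
      simp at this
    | cons a l' =>
      simp only [List.cons_append] at h
      rw [List.cons.injEq] at h
      rcases ih l' h.2 with ⟨sfx', he⟩ | ⟨h1, h2, h3⟩
      · left; exact ⟨sfx', by simp [h.1, he]⟩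
      · right; exact ⟨by simp [h.1, h1], h2, h3⟩

def Keyset (g : List (String × Int × List String)) (n : String) : Prop :=
  (List.lookup n g).isSome = true

def Ready (g : List (String × Int × List String)) (acc : List String) (n : String) : Prop :=
  ∃ w c, List.lookup n g = some (w, c) ∧ c.Nodup ∧ ∀ d ∈ c, d ∈ acc ∧ pvLastPar g d = some n

theorem Ready_mono (g : List (String × Int × List String)) (acc acc' : List String)
    (hsub : ∀ x ∈ acc, x ∈ acc') (n : String) (h : Ready g acc n) : Ready g acc' n := by
  obtain ⟨w, c, hl, hc, hd⟩ := h
  exact ⟨w, c, hl, hc, fun d hd' => ⟨hsub d (hd d hd').1, (hd d hd').2⟩⟩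

theorem ready_child_mem (g : List (String × Int × List String)) (s : List String)
    (dst : String) (wd : Int) (cd : List String) (hld : List.lookup dst g = some (wd, cd))
    (src : String) (hsm : src ∈ cd) (h : Ready g s dst) : src ∈ s := by
  obtain ⟨w, c, hl, _, hd⟩ := h
  rw [hld] at hl
  cases hl
  exact (hd src hsm).1

theorem nodup_sub_len (g : List (String × Int × List String)) (l : List String)
    (hnd : l.Nodup) (hsub : ∀ x ∈ l, x ∈ g.map (·.1)) : l.length ≤ g.length := by
  have h1 : l.toFinset.card = l.length := List.toFinset_card_of_nodup hnd
  have h2 : l.toFinset ⊆ (g.map (·.1)).toFinset := by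
    intro x hx
    exact List.mem_toFinset.mpr (hsub x (List.mem_toFinset.mp hx))
  calc l.length = l.toFinset.card := h1.symm
    _ ≤ (g.map (·.1)).toFinset.card := Finset.card_le_card h2
    _ ≤ (g.map (·.1)).length := List.toFinset_card_le _
    _ = g.length := List.length_map ..

-- counting matched children: the filtered accumulator
theorem filter_le (g : List (String × Int × List String)) (hnd : (g.map (·.1)).Nodup)
    (acc : List String) (hacc : acc.Nodup) (n : String) (w : Int) (c : List String)
    (hl : List.lookup n g = some (w, c)) :
    (acc.filter (fun d => pvLastPar g d == some n)).length ≤ c.length ∧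
    ((acc.filter (fun d => pvLastPar g d == some n)).length = c.length ↔
      (c.Nodup ∧ ∀ d ∈ c, d ∈ acc ∧ pvLastPar g d = some n)) := by
  set F := acc.filter (fun d => pvLastPar g d == some n) with hF
  have hFnd : F.Nodup := List.Nodup.filter _ hacc
  have hFsub : ∀ d ∈ F, d ∈ c ∧ d ∈ acc ∧ pvLastPar g d = some n := by
    intro d hd
    have h1 := List.of_mem_filter hd
    have h2 := List.mem_of_mem_filter hd
    have h3 : pvLastPar g d = some n := by simpa using h1
    obtain ⟨w', c', hl', hd'⟩ := lastPar_mem g hnd d n h3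
    rw [hl] at hl'; cases hl'
    exact ⟨hd', h2, h3⟩
  have hcard : F.toFinset.card = F.length := List.toFinset_card_of_nodup hFnd
  have hsubF : F.toFinset ⊆ c.toFinset := by
    intro x hx
    exact List.mem_toFinset.mpr (hFsub x (List.mem_toFinset.mp hx)).1
  have hle : F.length ≤ c.length := by
    calc F.length = F.toFinset.card := hcard.symm
      _ ≤ c.toFinset.card := Finset.card_le_card hsubF
      _ ≤ c.length := List.toFinset_card_le _
  refine ⟨hle, ?_, ?_⟩
  · -- length equal → all matched
    intro heq
    have hcc : c.toFinset.card = c.length := by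
      have := Finset.card_le_card hsubF
      have := List.toFinset_card_le c
      omega
    have hcnd : c.Nodup := by
      have hd : c.dedup.length = c.length := by
        rw [List.card_toFinset] at hcc
        exact hcc
      have : c.dedup = c := List.Sublist.eq_of_length (List.dedup_sublist c) hd
      rw [← this]; exact List.nodup_dedup c
    have hFeq : F.toFinset = c.toFinset := by
      apply Finset.eq_of_subset_of_card_le hsubF
      omega
    refine ⟨hcnd, fun d hd => ?_⟩
    have : d ∈ F := by
      have : d ∈ F.toFinset := hFeq ▸ List.mem_toFinset.mpr hd
      exact List.mem_toFinset.mp this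
    exact ⟨(hFsub d this).2.1, (hFsub d this).2.2⟩
  · -- all matched → length equal
    rintro ⟨hcnd, hall⟩
    have hperm : F.Perm c := by
      rw [List.perm_ext_iff_of_nodup hFnd hcnd]
      intro x
      constructor
      · intro hx; exact (hFsub x hx).1
      · intro hx
        apply List.mem_filter.mpr
        exact ⟨(hall x hx).1, by simpa using (hall x hx).2⟩
    exact hperm.length_eq

theorem revA_eq_lastPar (g : List (String × Int × List String)) (d : String) :
    (pvRevA g).get? d = pvLastPar g d := by
  unfold pvRevA
  rw [revA_get]
  cases pvLastPar g d with
  | some s => rfl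
  | none => simp [PySem.Dict.get?_empty]

theorem topo_main (g : List (String × Int × List String)) (hnd : (g.map (·.1)).Nodup) :
    ∀ (fuel : Nat) (front : List String) (count : PySem.Dict String Int) (acc : List String),
    front.Nodup → acc.Nodup →
    (∀ n ∈ front, n ∉ acc) →
    (∀ n ∈ acc, Keyset g n) →
    (∀ n w c, List.lookup n g = some (w, c) →
       count.get? n = some ((c.length : Int) - ((acc.filter (fun d => pvLastPar g d == some n)).length : Int))) →
    (∀ n, n ∈ front ↔ (Keyset g n ∧ n ∉ acc ∧ Ready g acc n)) →
    (∀ pfx n sfx, acc = pfx ++ n :: sfx → Ready g pfx n) →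
    2 * g.length + 1 ≤ fuel + 2 * acc.length + front.length →
    (pvTopoA (pvRevA g) fuel front count acc).Nodup ∧
    (∀ pfx n sfx, pvTopoA (pvRevA g) fuel front count acc = pfx ++ n :: sfx → Ready g pfx n) ∧
    (∀ n, Keyset g n → n ∉ pvTopoA (pvRevA g) fuel front count acc →
       ¬ Ready g (pvTopoA (pvRevA g) fuel front count acc) n) ∧
    (∀ n ∈ pvTopoA (pvRevA g) fuel front count acc, Keyset g n) := by
  intro fuel
  induction fuel with
  | zero =>
    intro front count acc hfn han hfa hak hcount hfront hord hfuel
    cases front with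
    | nil =>
      simp only [pvTopoA]
      refine ⟨han, hord, ?_, hak⟩
      intro n hk hn hR
      have := (hfront n).mpr ⟨hk, hn, hR⟩
      simp at this
    | cons src fr =>
      exfalso
      have hsub : (acc ++ src :: fr).Nodup := by
        rw [List.nodup_append]
        refine ⟨han, hfn, ?_⟩
        intro a ha b hb he
        exact hfa b hb (he ▸ ha)
      have hkeys : ∀ x ∈ acc ++ src :: fr, x ∈ g.map (·.1) := by
        intro x hx
        rcases List.mem_append.mp hx with h | h
        · exact (lookup_isSome_iff g x).mp (hak x h)
        · exact (lookup_isSome_iff g x).mp ((hfront x).mp h).1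
      have := nodup_sub_len g _ hsub hkeys
      simp only [List.length_append, List.length_cons] at this hfuel
      omega
  | succ fuel ih =>
    intro front count acc hfn han hfa hak hcount hfront hord hfuel
    cases front with
    | nil =>
      simp only [pvTopoA]
      refine ⟨han, hord, ?_, hak⟩
      intro n hk hn hR
      have := (hfront n).mpr ⟨hk, hn, hR⟩
      simp at this
    | cons src fr =>
      have hsrc := (hfront src).mp (List.mem_cons_self ..)
      obtain ⟨hsrck, hsrcacc, hsrcready⟩ := hsrc
      have hsrcfr : src ∉ fr := (List.nodup_cons.mp hfn).1
      have hfn' : fr.Nodup := (List.nodup_cons.mp hfn).2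
      have hacc' : (acc ++ [src]).Nodup := by
        rw [List.nodup_append]
        refine ⟨han, List.nodup_singleton _, ?_⟩
        intro a ha b hb he
        rw [List.mem_singleton] at hb
        subst hb
        exact hsrcacc (he ▸ ha)
      have hord' : ∀ pfx n sfx, acc ++ [src] = pfx ++ n :: sfx → Ready g pfx n := by
        intro pfx n sfx heq
        rcases append_singleton_decomp acc src pfx n sfx heq with ⟨sfx', he⟩ | ⟨h1, h2, _⟩
        · exact hord pfx n sfx' he
        · subst h1; subst h2; exact hsrcready
      have hak' : ∀ n ∈ acc ++ [src], Keyset g n := by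
        intro n hn
        rcases List.mem_append.mp hn with h | h
        · exact hak n h
        · rw [List.mem_singleton] at h; exact h ▸ hsrck
      simp only [pvTopoA, revA_eq_lastPar]
      cases hlp : pvLastPar g src with
      | none =>
        apply ih fr count (acc ++ [src]) hfn' hacc'
        · intro n hn
          rw [List.mem_append, List.mem_singleton]
          rintro (h | h)
          · exact hfa n (List.mem_cons_of_mem _ hn) h
          · exact hsrcfr (h ▸ hn)
        · exact hak'
        · intro n w c hl
          rw [hcount n w c hl]
          congr 2
          rw [List.filter_append]
          have : List.filter (fun d => pvLastPar g d == some n) [src] = [] := by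
            simp [hlp]
          rw [this, List.append_nil]
        · intro n
          constructor
          · intro hn
            have hmem := (hfront n).mp (List.mem_cons_of_mem _ hn)
            refine ⟨hmem.1, ?_, Ready_mono g acc _ (fun x hx => List.mem_append_left _ hx) n hmem.2.2⟩
            rw [List.mem_append, List.mem_singleton]
            rintro (h | h)
            · exact hmem.2.1 h
            · exact hsrcfr (h ▸ hn)
          · rintro ⟨hk, hn, hR⟩
            have hRacc : Ready g acc n := by
              obtain ⟨w, c, hl, hc, hd⟩ := hR
              refine ⟨w, c, hl, hc, fun d hd' => ?_⟩
              have h1 := hd d hd'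
              rcases List.mem_append.mp h1.1 with h | h
              · exact ⟨h, h1.2⟩
              · rw [List.mem_singleton] at h
                exfalso
                rw [h] at h1
                rw [hlp] at h1
                exact absurd h1.2 (by simp)
            have := (hfront n).mpr ⟨hk, fun h => hn (List.mem_append_left _ h), hRacc⟩
            rcases List.mem_cons.mp this with h | h
            · exfalso; exact hn (h ▸ List.mem_append_right _ (List.mem_singleton.mpr rfl))
            · exact h
        · exact hord'
        · simp only [List.length_append, List.length_singleton, List.length_cons] at hfuel ⊢
          omega
      | some dst =>
        obtain ⟨wd, cd, hld, hsrcmem⟩ := lastPar_mem g hnd src dst hlp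
        have hdstacc : dst ∉ acc := by
          intro h
          obtain ⟨s, t, he⟩ := List.append_of_mem h
          have := ready_child_mem g s dst wd cd hld src hsrcmem (hord s dst t he)
          exact hsrcacc (he ▸ List.mem_append_left _ this)
        have hdstsf : dst ∉ src :: fr := by
          intro h
          have := ((hfront dst).mp h).2.2
          exact hsrcacc (ready_child_mem g acc dst wd cd hld src hsrcmem this)
        have hdstsrc : dst ≠ src := fun h => hdstsf (h ▸ List.mem_cons_self ..)
        have hdstfr : dst ∉ fr := fun h => hdstsf (List.mem_cons_of_mem _ h)
        have hcnt := hcount dst wd cd hld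
        have hgetD : count.getD dst 0 = (cd.length : Int) - ((acc.filter (fun d => pvLastPar g d == some dst)).length : Int) :=
          PySem.Dict.getD_of_get?_eq_some _ _ hcnt
        dsimp only
        rw [hgetD]
        set m := (acc.filter (fun d => pvLastPar g d == some dst)).length with hm
        set cval : Int := (cd.length : Int) - (m : Int) - 1 with hcval
        have hflt : ∀ n : String, ((acc ++ [src]).filter (fun d => pvLastPar g d == some n)).length
            = if n = dst then m + 1 else (acc.filter (fun d => pvLastPar g d == some n)).length := by
          intro n
          rw [List.filter_append]
          by_cases h : n = dst
          · subst h
            have : List.filter (fun d => pvLastPar g d == some n) [src] = [src] := by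
              simp [hlp]
            rw [this]
            simp [hm]
          · have hb : (pvLastPar g src == some n) = false := by
              rw [hlp]
              simp only [beq_eq_false_iff_ne, ne_eq, Option.some.injEq]
              exact fun he => h he.symm
            have : List.filter (fun d => pvLastPar g d == some n) [src] = [] := by
              simp [List.filter_cons, hb]
            rw [this, List.append_nil, if_neg h]
        have hfle := filter_le g hnd (acc ++ [src]) hacc' dst wd cd hld
        have hm1le : m + 1 ≤ cd.length := by
          have := hfle.1
          rw [hflt dst, if_pos rfl] at this
          omega
        have hreadyiff : cval = 0 ↔ Ready g (acc ++ [src]) dst := by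
          constructor
          · intro h0
            have hmeq : ((acc ++ [src]).filter (fun d => pvLastPar g d == some dst)).length = cd.length := by
              rw [hflt dst, if_pos rfl]
              rw [hcval] at h0
              omega
            obtain ⟨hcnd2, hall⟩ := hfle.2.mp hmeq
            exact ⟨wd, cd, hld, hcnd2, hall⟩
          · intro hR
            obtain ⟨w', c', hl', hc', hd'⟩ := hR
            rw [hld] at hl'; cases hl'
            have hmeq := hfle.2.mpr ⟨hc', hd'⟩
            rw [hflt dst, if_pos rfl] at hmeq
            rw [hcval]
            omega
        -- the step: continue with the invariant
        apply ih _ _ _ _ hacc'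
        · -- disjointness front' acc'
          intro n hn
          rw [List.mem_append, List.mem_singleton]
          by_cases hc0 : cval = 0
          · rw [if_pos hc0] at hn
            rcases List.mem_append.mp hn with h | h
            · rintro (h' | h')
              · exact hfa n (List.mem_cons_of_mem _ h) h'
              · exact hsrcfr (h' ▸ h)
            · rw [List.mem_singleton] at h
              subst h
              rintro (h' | h')
              · exact hdstacc h'
              · exact hdstsrc h'
          · rw [if_neg hc0] at hn
            rintro (h' | h')
            · exact hfa n (List.mem_cons_of_mem _ hn) h'
            · exact hsrcfr (h' ▸ hn)
        · exact hak'
        · -- count invariant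
          intro n w c hl
          rw [PySem.Dict.get?_insert]
          by_cases h : n = dst
          · subst h
            rw [hl] at hld; cases hld
            rw [if_pos rfl, hflt n, if_pos rfl]
            rw [hcval]
            congr 1
            push_cast
            ring
          · rw [if_neg h, hcount n w c hl, hflt n, if_neg h]
        · -- front characterization
          intro n
          by_cases h : n = dst
          · subst h
            constructor
            · intro hn
              have hc0 : cval = 0 := by
                by_cases hc0 : cval = 0
                · exact hc0
                · rw [if_neg hc0] at hn; exact absurd hn hdstfr
              refine ⟨by unfold Keyset; rw [hld]; rfl, ?_, hreadyiff.mp hc0⟩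
              rw [List.mem_append, List.mem_singleton]
              rintro (h' | h')
              · exact hdstacc h'
              · exact hdstsrc h'
            · rintro ⟨hk, hnacc, hR⟩
              have hc0 := hreadyiff.mpr hR
              rw [if_pos hc0]
              exact List.mem_append_right _ (List.mem_singleton.mpr rfl)
          · constructor
            · intro hn
              have hnfr : n ∈ fr := by
                by_cases hc0 : cval = 0
                · rw [if_pos hc0] at hn
                  rcases List.mem_append.mp hn with h' | h'
                  · exact h'
                  · rw [List.mem_singleton] at h'; exact absurd h' h
                · rw [if_neg hc0] at hn; exact hn
              have hmem := (hfront n).mp (List.mem_cons_of_mem _ hnfr)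
              refine ⟨hmem.1, ?_, Ready_mono g acc _ (fun x hx => List.mem_append_left _ hx) n hmem.2.2⟩
              rw [List.mem_append, List.mem_singleton]
              rintro (h' | h')
              · exact hmem.2.1 h'
              · exact hsrcfr (h' ▸ hnfr)
            · rintro ⟨hk, hnacc, hR⟩
              have hRacc : Ready g acc n := by
                obtain ⟨w, c, hl, hc, hd⟩ := hR
                refine ⟨w, c, hl, hc, fun d hd' => ?_⟩
                have h1 := hd d hd'
                rcases List.mem_append.mp h1.1 with h2 | h2
                · exact ⟨h2, h1.2⟩
                · rw [List.mem_singleton] at h2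
                  exfalso
                  rw [h2] at h1
                  rw [hlp] at h1
                  have := h1.2
                  rw [Option.some.injEq] at this
                  exact h this.symm
              have := (hfront n).mpr ⟨hk, fun h' => hnacc (List.mem_append_left _ h'), hRacc⟩
              have hnfr : n ∈ fr := by
                rcases List.mem_cons.mp this with h' | h'
                · exfalso; exact hnacc (h' ▸ List.mem_append_right _ (List.mem_singleton.mpr rfl))
                · exact h'
              by_cases hc0 : cval = 0
              · rw [if_pos hc0]; exact List.mem_append_left _ hnfr
              · rw [if_neg hc0]; exact hnfr
        · exact hord'
        · by_cases hc0 : cval = 0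
          · rw [if_pos hc0]
            simp only [List.length_append, List.length_singleton, List.length_cons] at hfuel ⊢
            omega
          · rw [if_neg hc0]
            simp only [List.length_append, List.length_singleton, List.length_cons] at hfuel ⊢
            omega
        · -- front' nodup
          by_cases hc0 : cval = 0
          · rw [if_pos hc0]
            rw [List.nodup_append]
            refine ⟨hfn', List.nodup_singleton _, ?_⟩
            intro a ha b hb he
            rw [List.mem_singleton] at hb
            subst hb
            exact hdstfr (he ▸ ha)
          · rw [if_neg hc0]; exact hfn'

def BadNode (g : List (String × Int × List String)) (n : String) : Prop :=
  ∃ w c, List.lookup n g = some (w, c) ∧ c ≠ [] ∧ c.Nodup ∧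
    (∀ d ∈ c, (List.lookup d g).isSome = true ∧ pvLastPar g d = some n) ∧
    ∃ k, (∀ d ∈ c, (pvWt g k d).isSome = true) ∧
      (PySem.Set.ofList (c.map (fun d => (pvWt g k d).getD 0))).length ≠ 1

def Bad (g : List (String × Int × List String)) : Prop := ∃ n, BadNode g n

theorem mem_front0 (g : List (String × Int × List String)) (hnd : (g.map (·.1)).Nodup) (n : String) :
    n ∈ (g.filter (fun p => p.2.2.isEmpty)).map (·.1) ↔ ∃ w, List.lookup n g = some (w, []) := by
  rw [List.mem_map]
  constructor
  · rintro ⟨p, hp, he⟩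
    rw [List.mem_filter] at hp
    have := lookup_eq_some_of_mem_nodup g hnd p hp.1
    refine ⟨p.2.1, ?_⟩
    rw [he] at this
    have he2 : p.2.2 = [] := by simpa using hp.2
    rw [this]
    simp [← he2]
  · rintro ⟨w, hl⟩
    refine ⟨(n, w, []), ?_, rfl⟩
    rw [List.mem_filter]
    exact ⟨mem_of_lookup_eq_some g n (w, []) hl, by simp⟩

theorem ts_props (g : List (String × Int × List String)) (hnd : (g.map (·.1)).Nodup) :
    (pvTopoA (pvRevA g) (2 * g.length + 1)
      ((g.filter (fun p => p.2.2.isEmpty)).map (·.1)) (pvCountA g) []).Nodup ∧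
    (∀ pfx n sfx, pvTopoA (pvRevA g) (2 * g.length + 1)
        ((g.filter (fun p => p.2.2.isEmpty)).map (·.1)) (pvCountA g) [] = pfx ++ n :: sfx →
      Ready g pfx n) ∧
    (∀ n, Keyset g n →
      n ∉ pvTopoA (pvRevA g) (2 * g.length + 1)
        ((g.filter (fun p => p.2.2.isEmpty)).map (·.1)) (pvCountA g) [] →
      ¬ Ready g (pvTopoA (pvRevA g) (2 * g.length + 1)
        ((g.filter (fun p => p.2.2.isEmpty)).map (·.1)) (pvCountA g) []) n) ∧
    (∀ n ∈ pvTopoA (pvRevA g) (2 * g.length + 1)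
        ((g.filter (fun p => p.2.2.isEmpty)).map (·.1)) (pvCountA g) [], Keyset g n) := by
  refine topo_main g hnd _ _ _ _ ?_ ?_ ?_ ?_ ?_ ?_ ?_ ?_
  · -- front0 nodup
    have hsub : List.Sublist ((g.filter (fun p => p.2.2.isEmpty)).map (·.1)) (g.map (·.1)) :=
      List.Sublist.map _ List.filter_sublist
    exact hnd.sublist hsub
  · exact List.nodup_nil
  · intro n _; simp
  · intro n h; simp at h
  · -- count init
    intro n w c hl
    unfold pvCountA
    rw [countA_get g hnd, hl]
    simp
  · -- front0 characterization
    intro n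
    rw [mem_front0 g hnd n]
    constructor
    · rintro ⟨w, hl⟩
      refine ⟨by unfold Keyset; rw [hl]; rfl, by simp, w, [], hl, List.nodup_nil, by simp⟩
    · rintro ⟨hk, _, w, c, hl, _, hall⟩
      have hc : c = [] := by
        rw [List.eq_nil_iff_forall_not_mem]
        intro d hd
        exact absurd (hall d hd).1 (by simp)
      exact ⟨w, hc ▸ hl⟩
  · intro pfx n sfx h; exact absurd h (by simp)
  · simp

theorem ts_elem_wf (g : List (String × Int × List String)) (hnd : (g.map (·.1)).Nodup)
    (ts : List String)
    (hord : ∀ pfx n sfx, ts = pfx ++ n :: sfx → Ready g pfx n)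
    (htsk : ∀ n ∈ ts, Keyset g n) :
    ∀ pfx n sfx, ts = pfx ++ n :: sfx → ∃ w, Wrel g n w := by
  have main : ∀ L pfx n sfx, pfx.length ≤ L → ts = pfx ++ n :: sfx → ∃ w, Wrel g n w := by
    intro L
    induction L using Nat.strong_induction_on with
    | _ L ihL =>
      intro pfx n sfx hlen heq
      obtain ⟨w, c, hl, hcnd, hchild⟩ := hord pfx n sfx heq
      have hchildwf : ∀ d ∈ c, ∃ wd, Wrel g d wd := by
        intro d hd
        obtain ⟨p1, p2, hp⟩ := List.append_of_mem (hchild d hd).1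
        have heq2 : ts = p1 ++ d :: (p2 ++ n :: sfx) := by
          rw [heq, hp]; simp
        have hlt : p1.length < L := by
          have : pfx.length = p1.length + p2.length + 1 := by rw [hp]; simp; omega
          omega
        exact ihL p1.length hlt p1 d (p2 ++ n :: sfx) le_rfl heq2
      obtain ⟨K, hK⟩ := maxfuel g c hchildwf
      by_cases hc : c = []
      · exact ⟨w, K + 1, by rw [pvWt, hl]; simp [hc]⟩
      · refine ⟨w + (c.map (fun d => (pvWt g K d).getD 0)).sum, K + 1, ?_⟩
        rw [pvWt, hl]
        simp only [Option.bind_some]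
        rw [if_neg hc]
        have hcond : c.Nodup ∧ ∀ d ∈ c, (List.lookup d g).isSome = true ∧ pvLastPar g d = some n := by
          refine ⟨hcnd, fun d hd => ⟨?_, (hchild d hd).2⟩⟩
          have : d ∈ ts := by rw [heq]; exact List.mem_append_left _ (hchild d hd).1
          exact htsk d this
        rw [if_pos hcond, if_pos (List.all_eq_true.mpr (fun d hd => by simpa using hK d hd))]
  intro pfx n sfx heq
  exact main pfx.length pfx n sfx le_rfl heq

theorem wf_elem_ts (g : List (String × Int × List String)) (hnd : (g.map (·.1)).Nodup)
    (ts : List String)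
    (hcl : ∀ n, Keyset g n → n ∉ ts → ¬ Ready g ts n) :
    ∀ k n, (pvWt g k n).isSome = true → n ∈ ts := by
  intro k
  induction k with
  | zero => intro n h; simp [pvWt] at h
  | succ j ih =>
    intro n h
    rw [pvWt] at h
    cases hl : List.lookup n g with
    | none => rw [hl] at h; simp at h
    | some wc =>
      rw [hl] at h
      simp only [Option.bind_some] at h
      have hk : Keyset g n := by unfold Keyset; rw [hl]; rfl
      by_cases hc : wc.2 = []
      · rw [if_pos hc] at h
        by_contra hmem
        exact hcl n hk hmem ⟨wc.1, wc.2, by rw [hl], hc ▸ List.nodup_nil, by simp [hc]⟩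
      · rw [if_neg hc] at h
        by_cases hcond : wc.2.Nodup ∧ ∀ d ∈ wc.2, (List.lookup d g).isSome = true ∧ pvLastPar g d = some n
        · rw [if_pos hcond] at h
          by_cases hall : wc.2.all (fun d => (pvWt g j d).isSome) = true
          · by_contra hmem
            refine hcl n hk hmem ⟨wc.1, wc.2, by rw [hl], hcond.1, fun d hd => ⟨?_, (hcond.2 d hd).2⟩⟩
            exact ih d (by simpa using List.all_eq_true.mp hall d hd)
          · rw [if_neg hall] at h; simp at h
        · rw [if_neg hcond] at h; simp at h

theorem checkLoop_iff (g : List (String × Int × List String)) (hnd : (g.map (·.1)).Nodup)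
    (ts : List String)
    (hord : ∀ pfx n sfx, ts = pfx ++ n :: sfx → Ready g pfx n)
    (htsk : ∀ n ∈ ts, Keyset g n) :
    ∀ rest done weight, ts = done ++ rest →
    (∀ n w, weight.get? n = some w ↔ (n ∈ done ∧ Wrel g n w)) →
    (pvCheckLoopA g rest weight = true ↔ ∀ n ∈ rest, ¬ BadNode g n) := by
  intro rest
  induction rest with
  | nil =>
    intro done weight _ _
    simp [pvCheckLoopA]
  | cons node rest' ih =>
    intro done weight heq hw
    obtain ⟨w, c, hl, hcnd, hchild⟩ := hord done node rest' heq
    have heq' : ts = (done ++ [node]) ++ rest' := by rw [heq]; simp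
    have hnodets : node ∈ ts := by rw [heq]; exact List.mem_append_right _ (List.mem_cons_self ..)
    simp only [pvCheckLoopA]
    rw [hl]
    simp only [Option.getD_some]
    by_cases hc : c = []
    · rw [if_pos hc]
      have hwrel : Wrel g node w := ⟨1, by rw [pvWt, hl]; simp [hc]⟩
      have hw' : ∀ n v, (weight.insert node w).get? n = some v ↔ (n ∈ done ++ [node] ∧ Wrel g n v) := by
        intro n v
        rw [PySem.Dict.get?_insert]
        by_cases hn : n = node
        · subst hn
          rw [if_pos rfl]
          simp only [List.mem_append, List.mem_singleton, Option.some.injEq]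
          constructor
          · rintro rfl; exact ⟨Or.inr trivial, hwrel⟩
          · rintro ⟨_, hv⟩; exact Wrel_func g n w v hwrel hv
        · rw [if_neg hn, hw n v]
          simp only [List.mem_append, List.mem_singleton]
          constructor
          · rintro ⟨h1, h2⟩; exact ⟨Or.inl h1, h2⟩
          · rintro ⟨h1 | h1, h2⟩
            · exact ⟨h1, h2⟩
            · exact absurd h1 hn
      rw [ih (done ++ [node]) (weight.insert node w) heq' hw']
      have hnb : ¬ BadNode g node := by
        rintro ⟨w', c', hl', hc', _⟩
        rw [hl] at hl'; cases hl'
        exact hc' hc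
      constructor
      · intro h n hn
        rcases List.mem_cons.mp hn with h1 | h1
        · exact h1 ▸ hnb
        · exact h n h1
      · intro h n hn
        exact h n (List.mem_cons_of_mem _ hn)
    · rw [if_neg hc]
      -- each child already has a weight
      have hchildw : ∀ d ∈ c, ∃ v, weight.get? d = some v ∧ Wrel g d v := by
        intro d hd
        have hddone : d ∈ done := (hchild d hd).1
        obtain ⟨p1, p2, hp⟩ := List.append_of_mem hddone
        have heq2 : ts = p1 ++ d :: (p2 ++ node :: rest') := by rw [heq, hp]; simp
        obtain ⟨v, hv⟩ := ts_elem_wf g hnd ts hord htsk p1 d (p2 ++ node :: rest') heq2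
        exact ⟨v, (hw d v).mpr ⟨hddone, hv⟩, hv⟩
      obtain ⟨K, hK⟩ := maxfuel g c (fun d hd => (hchildw d hd).elim (fun v hv => ⟨v, hv.2⟩))
      have hsons : c.map (fun s => weight.getD s 0) = c.map (fun d => (pvWt g K d).getD 0) := by
        apply List.map_congr_left
        intro d hd
        obtain ⟨v, hget, hWv⟩ := hchildw d hd
        obtain ⟨v', hv'⟩ := Option.isSome_iff_exists.mp (hK d hd)
        have : v' = v := Wrel_func g d v' v ⟨K, hv'⟩ hWv
        rw [PySem.Dict.getD_of_get?_eq_some _ _ hget, hv', this]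
        rfl
      have hkeys2 : ∀ d ∈ c, (List.lookup d g).isSome = true := by
        intro d hd
        have : d ∈ ts := by rw [heq]; exact List.mem_append_left _ (hchild d hd).1
        exact htsk d this
      by_cases hT : (PySem.Set.ofList (c.map (fun s => weight.getD s 0))).length ≠ 1
      · rw [if_pos hT]
        have hbad : BadNode g node := by
          refine ⟨w, c, hl, hc, hcnd, fun d hd => ⟨hkeys2 d hd, (hchild d hd).2⟩, K, hK, ?_⟩
          rw [← hsons]; exact hT
        constructor
        · intro h; exact absurd h (by simp)
        · intro h
          exact absurd hbad (h node (List.mem_cons_self ..))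
      · rw [if_neg hT]
        push_neg at hT
        have hwrel : Wrel g node (w + (c.map (fun s => weight.getD s 0)).sum) := by
          refine ⟨K + 1, ?_⟩
          rw [pvWt, hl]
          simp only [Option.bind_some]
          rw [if_neg hc, if_pos ⟨hcnd, fun d hd => ⟨hkeys2 d hd, (hchild d hd).2⟩⟩,
            if_pos (List.all_eq_true.mpr (fun d hd => by simpa using hK d hd)), ← hsons]
        have hnb : ¬ BadNode g node := by
          rintro ⟨w', c', hl', _, _, _, K', hK', hT'⟩
          rw [hl] at hl'; cases hl'
          have hmaps : c.map (fun d => (pvWt g K' d).getD 0) = c.map (fun d => (pvWt g K d).getD 0) := by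
            apply List.map_congr_left
            intro d hd
            obtain ⟨v1, hv1⟩ := Option.isSome_iff_exists.mp (hK' d hd)
            obtain ⟨v2, hv2⟩ := Option.isSome_iff_exists.mp (hK d hd)
            rw [hv1, hv2]
            have : v1 = v2 := Wrel_func g d v1 v2 ⟨K', hv1⟩ ⟨K, hv2⟩
            rw [this]
          rw [hmaps, ← hsons] at hT'
          exact hT' hT
        have hw' : ∀ n v, (weight.insert node (w + (c.map (fun s => weight.getD s 0)).sum)).get? n = some v ↔
            (n ∈ done ++ [node] ∧ Wrel g n v) := by
          intro n v
          rw [PySem.Dict.get?_insert]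
          by_cases hn : n = node
          · subst hn
            rw [if_pos rfl]
            simp only [List.mem_append, List.mem_singleton, Option.some.injEq]
            constructor
            · rintro rfl; exact ⟨Or.inr trivial, hwrel⟩
            · rintro ⟨_, hv⟩; exact Wrel_func g n _ v hwrel hv
          · rw [if_neg hn, hw n v]
            simp only [List.mem_append, List.mem_singleton]
            constructor
            · rintro ⟨h1, h2⟩; exact ⟨Or.inl h1, h2⟩
            · rintro ⟨h1 | h1, h2⟩
              · exact ⟨h1, h2⟩
              · exact absurd h1 hn
        rw [ih (done ++ [node]) _ heq' hw']
        constructor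
        · intro h n hn
          rcases List.mem_cons.mp hn with h1 | h1
          · exact h1 ▸ hnb
          · exact h n h1
        · intro h n hn
          exact h n (List.mem_cons_of_mem _ hn)

theorem check_iff (g : List (String × Int × List String)) (hnd : (g.map (·.1)).Nodup) :
    check g = true ↔ ¬ Bad g := by
  obtain ⟨hts1, hts2, hts3, hts4⟩ := ts_props g hnd
  unfold check
  rw [checkLoop_iff g hnd _ hts2 hts4 _ [] PySem.Dict.empty rfl
    (by intro n w; rw [PySem.Dict.get?_empty]; simp)]
  constructor
  · rintro h ⟨n, hb⟩
    have hwf : ∃ K, (pvWt g (K + 1) n).isSome = true := by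
      obtain ⟨w, c, hl, hc, hcnd, hkeys, K, hK, _⟩ := hb
      refine ⟨K, ?_⟩
      rw [pvWt, hl]
      simp only [Option.bind_some]
      rw [if_neg hc, if_pos ⟨hcnd, hkeys⟩,
        if_pos (List.all_eq_true.mpr (fun d hd => by simpa using hK d hd))]
      rfl
    obtain ⟨K, hK⟩ := hwf
    exact h n (wf_elem_ts g hnd _ hts3 (K + 1) n hK) hb
  · intro h n _ hb
    exact h ⟨n, hb⟩

-- ===== B-side characterisation: resolvable subtree weights =====
def pvWtB (g : List (String × Int × List String)) : Nat → String → Option Int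
  | 0, _ => none
  | k + 1, n =>
      (List.lookup n g).bind (fun wc =>
        if wc.2.all (fun d => (pvWtB g k d).isSome) = true then
          some (wc.1 + (wc.2.map (fun d => (pvWtB g k d).getD 0)).sum)
        else none)

def WrelB (g : List (String × Int × List String)) (n : String) (w : Int) : Prop :=
  ∃ k, pvWtB g k n = some w

def BadNodeB (g : List (String × Int × List String)) (n : String) : Prop :=
  ∃ w c, List.lookup n g = some (w, c) ∧ c ≠ [] ∧
    ∃ k, (∀ d ∈ c, (pvWtB g k d).isSome = true) ∧
      (PySem.Set.ofList (c.map (fun d => (pvWtB g k d).getD 0))).length ≠ 1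

def BadB (g : List (String × Int × List String)) : Prop := ∃ n, BadNodeB g n

theorem pvWtB_key (g : List (String × Int × List String)) (k : Nat) (d : String)
    (h : (pvWtB g k d).isSome = true) : (List.lookup d g).isSome = true := by
  cases k with
  | zero => simp [pvWtB] at h
  | succ j =>
    rw [pvWtB] at h
    cases hl : List.lookup d g with
    | none => rw [hl] at h; simp at h
    | some wc => rfl

theorem count_child_le_flat (g : List (String × Int × List String))
    (p : String × Int × List String) (hp : p ∈ g) (d : String) :
    p.2.2.count d ≤ (g.flatMap (fun q => q.2.2)).count d := by
  induction g with
  | nil => simp at hp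
  | cons q rest ih =>
    rw [List.flatMap_cons, List.count_append]
    rcases List.mem_cons.mp hp with h | h
    · subst h; omega
    · have := ih h; omega

theorem lastPar_none_of_not_mem (g : List (String × Int × List String)) (d : String)
    (h : ∀ p ∈ g, d ∉ p.2.2) : pvLastPar g d = none := by
  unfold pvLastPar
  rw [List.find?_eq_none.mpr]
  · rfl
  · intro p hp
    have := h p (List.mem_reverse.mp hp)
    simpa using this

theorem lastPar_unique (g : List (String × Int × List String)) :
    ∀ (n : String) (w : Int) (c : List String) (d : String),
    (g.flatMap (fun p => p.2.2)).count d ≤ 1 → (n, w, c) ∈ g → d ∈ c →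
    pvLastPar g d = some n := by
  induction g with
  | nil => intro n w c d _ hm; simp at hm
  | cons p rest ih =>
    intro n w c d hcnt hm hd
    rw [List.flatMap_cons, List.count_append] at hcnt
    rw [lastPar_cons]
    rcases List.mem_cons.mp hm with h | h
    · have hdp : d ∈ p.2.2 := by rw [← h]; exact hd
      have h1 : 0 < p.2.2.count d := List.count_pos_iff.mpr hdp
      have hnone : pvLastPar rest d = none := by
        apply lastPar_none_of_not_mem
        intro q hq hdq
        have h2 : 0 < q.2.2.count d := List.count_pos_iff.mpr hdq
        have h3 := count_child_le_flat rest q hq d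
        omega
      rw [hnone]
      simp only [hdp, if_pos]
      rw [← h]
    · have h1 : 0 < c.count d := List.count_pos_iff.mpr hd
      have h2 := count_child_le_flat rest (n, w, c) h d
      have h3 : 0 < (rest.flatMap (fun p => p.2.2)).count d := by
        simp only at h2; omega
      have hrec := ih n w c d (by omega) h hd
      rw [hrec]

theorem nodup_of_counts (c : List String) (h : ∀ d ∈ c, c.count d ≤ 1) : c.Nodup := by
  rw [List.nodup_iff_count_le_one]
  intro a
  by_cases ha : a ∈ c
  · exact h a ha
  · rw [List.count_eq_zero.mpr ha]; omega

theorem pvWt_eq_pvWtB (g : List (String × Int × List String)) (hpre : Pre_check g) :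
    ∀ (k : Nat) (n : String), pvWt g k n = pvWtB g k n := by
  intro k
  induction k with
  | zero => intro n; rfl
  | succ j ih =>
    intro n
    rw [pvWt, pvWtB]
    cases hl : List.lookup n g with
    | none => rfl
    | some wc =>
      simp only [Option.bind_some]
      obtain ⟨w, c⟩ := wc
      simp only
      by_cases hc : c = []
      · subst hc; simp
      · rw [if_neg hc]
        by_cases hall : c.all (fun d => (pvWtB g j d).isSome) = true
        · have hmem : (n, w, c) ∈ g := mem_of_lookup_eq_some g n (w, c) hl
          have hkeys : ∀ d ∈ c, (List.lookup d g).isSome = true := by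
            intro d hd
            exact pvWtB_key g j d (by simpa using List.all_eq_true.mp hall d hd)
          have hlp : ∀ d ∈ c, pvLastPar g d = some n := by
            intro d hd
            exact lastPar_unique g n w c d
              (hpre.2 d ((lookup_isSome_iff g d).mp (hkeys d hd))) hmem hd
          have hnd_c : c.Nodup := by
            apply nodup_of_counts
            intro d hd
            have h1 := count_child_le_flat g (n, w, c) hmem d
            have h2 := hpre.2 d ((lookup_isSome_iff g d).mp (hkeys d hd))
            simp only at h1
            omega
          rw [if_pos ⟨hnd_c, fun d hd => ⟨hkeys d hd, hlp d hd⟩⟩]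
          have hallA : c.all (fun d => (pvWt g j d).isSome) = true := by
            apply List.all_eq_true.mpr
            intro d hd
            rw [ih d]
            exact List.all_eq_true.mp hall d hd
          rw [if_pos hallA, if_pos hall]
          have : (c.map fun d => (pvWt g j d).getD 0) = c.map fun d => (pvWtB g j d).getD 0 :=
            List.map_congr_left fun d _ => by rw [ih d]
          rw [this]
        · rw [if_neg hall]
          by_cases hcond : c.Nodup ∧ ∀ d ∈ c, (List.lookup d g).isSome = true ∧ pvLastPar g d = some n
          · rw [if_pos hcond]
            simp only [ih]
            rw [if_neg hall]
          · rw [if_neg hcond]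

theorem wrelB_iff (g : List (String × Int × List String)) (hpre : Pre_check g)
    (n : String) (v : Int) : WrelB g n v ↔ Wrel g n v := by
  constructor
  · rintro ⟨k, hk⟩; exact ⟨k, by rw [pvWt_eq_pvWtB g hpre]; exact hk⟩
  · rintro ⟨k, hk⟩; exact ⟨k, by rw [← pvWt_eq_pvWtB g hpre]; exact hk⟩

theorem wrelB_func (g : List (String × Int × List String)) (hpre : Pre_check g)
    (n : String) (w w' : Int) (h : WrelB g n w) (h' : WrelB g n w') : w = w' :=
  Wrel_func g n w w' ((wrelB_iff g hpre n w).mp h) ((wrelB_iff g hpre n w').mp h')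

theorem maxfuelB (g : List (String × Int × List String)) (hpre : Pre_check g)
    (c : List String) (h : ∀ d ∈ c, ∃ w, WrelB g d w) :
    ∃ K, ∀ d ∈ c, (pvWtB g K d).isSome = true := by
  obtain ⟨K, hK⟩ := maxfuel g c
    (fun d hd => (h d hd).elim fun w hw => ⟨w, (wrelB_iff g hpre d w).mp hw⟩)
  exact ⟨K, fun d hd => by rw [← pvWt_eq_pvWtB g hpre]; exact hK d hd⟩

theorem badnodeB_indep (g : List (String × Int × List String)) (hpre : Pre_check g)
    (n : String) (w : Int) (c : List String) (hl : List.lookup n g = some (w, c)) (K : Nat)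
    (hK : ∀ d ∈ c, (pvWtB g K d).isSome = true)
    (hT : (PySem.Set.ofList (c.map (fun d => (pvWtB g K d).getD 0))).length = 1) :
    ¬ BadNodeB g n := by
  rintro ⟨w', c', hl', _, K', hK', hT'⟩
  rw [hl] at hl'; cases hl'
  have hmaps : c.map (fun d => (pvWtB g K' d).getD 0) = c.map (fun d => (pvWtB g K d).getD 0) := by
    apply List.map_congr_left
    intro d hd
    obtain ⟨v1, hv1⟩ := Option.isSome_iff_exists.mp (hK' d hd)
    obtain ⟨v2, hv2⟩ := Option.isSome_iff_exists.mp (hK d hd)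
    rw [hv1, hv2, wrelB_func g hpre d v1 v2 ⟨K', hv1⟩ ⟨K, hv2⟩]
  rw [hmaps, hT] at hT'
  exact hT' rfl

theorem Bad_iff_BadB (g : List (String × Int × List String)) (hpre : Pre_check g) :
    Bad g ↔ BadB g := by
  constructor
  · rintro ⟨n, w, c, hl, hc, _, _, K, hK, hT⟩
    refine ⟨n, w, c, hl, hc, K, ?_, ?_⟩
    · intro d hd; rw [← pvWt_eq_pvWtB g hpre]; exact hK d hd
    · have : (c.map fun d => (pvWtB g K d).getD 0) = c.map fun d => (pvWt g K d).getD 0 :=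
        List.map_congr_left fun d _ => by rw [pvWt_eq_pvWtB g hpre]
      rw [this]; exact hT
  · rintro ⟨n, w, c, hl, hc, K, hK, hT⟩
    have hmem := mem_of_lookup_eq_some g n (w, c) hl
    have hkeys : ∀ d ∈ c, (List.lookup d g).isSome = true :=
      fun d hd => pvWtB_key g K d (hK d hd)
    have hlp : ∀ d ∈ c, pvLastPar g d = some n := fun d hd =>
      lastPar_unique g n w c d (hpre.2 d ((lookup_isSome_iff g d).mp (hkeys d hd))) hmem hd
    have hnd_c : c.Nodup := by
      apply nodup_of_counts
      intro d hd
      have h1 := count_child_le_flat g (n, w, c) hmem d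
      have h2 := hpre.2 d ((lookup_isSome_iff g d).mp (hkeys d hd))
      simp only at h1
      omega
    refine ⟨n, w, c, hl, hc, hnd_c, fun d hd => ⟨hkeys d hd, hlp d hd⟩, K, ?_, ?_⟩
    · intro d hd; rw [pvWt_eq_pvWtB g hpre]; exact hK d hd
    · have : (c.map fun d => (pvWt g K d).getD 0) = c.map fun d => (pvWtB g K d).getD 0 :=
        List.map_congr_left fun d _ => by rw [pvWt_eq_pvWtB g hpre]
      rw [this]; exact hT

-- ===== invariants of B's sweep loop =====
def WOKB (g : List (String × Int × List String)) (wt : PySem.Dict String Int) : Prop :=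
  ∀ n v, wt.get? n = some v → WrelB g n v

def BOKB (g : List (String × Int × List String)) (wt : PySem.Dict String Int) (bal : Bool) : Prop :=
  (bal = false → BadB g) ∧ (bal = true → ∀ n v, wt.get? n = some v → ¬ BadNodeB g n)

theorem passB_inv (g : List (String × Int × List String)) (hpre : Pre_check g) :
    ∀ (l : List (String × Int × List String)), (∀ p ∈ l, p ∈ g) →
    ∀ (st : PySem.Dict String Int × Bool × Bool), WOKB g st.1 → BOKB g st.1 st.2.1 →
    WOKB g (l.foldl pvPassStep st).1 ∧
    BOKB g (l.foldl pvPassStep st).1 (l.foldl pvPassStep st).2.1 ∧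
    (∀ n v, st.1.get? n = some v → (l.foldl pvPassStep st).1.get? n = some v) ∧
    ((l.foldl pvPassStep st).2.2 = st.2.2 ∨
      ∃ n, st.1.get? n = none ∧ ((l.foldl pvPassStep st).1.get? n).isSome = true ∧ n ∈ g.map (·.1)) ∧
    ((l.foldl pvPassStep st).2.2 = false →
      (l.foldl pvPassStep st) = st ∧
      ∀ p ∈ l, st.1.get? p.1 = none → p.2.2.all (fun k => (st.1.get? k).isSome) = false) := by
  intro l
  induction l with
  | nil => intro _ st hW hB; exact ⟨hW, hB, fun n v h => h, Or.inl rfl, fun _ => ⟨rfl, by simp⟩⟩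
  | cons p l' ih =>
    intro hl st hW hB
    have hpg : p ∈ g := hl p (List.mem_cons_self ..)
    simp only [List.foldl_cons]
    by_cases hc : st.1.get? p.1 = none ∧ p.2.2.all (fun k => (st.1.get? k).isSome) = true
    · have hlkp : List.lookup p.1 g = some p.2 := lookup_eq_some_of_mem_nodup g hpre.1 p hpg
      have hkidw : ∀ d ∈ p.2.2, ∃ v, st.1.get? d = some v := by
        intro d hd
        exact Option.isSome_iff_exists.mp (by simpa using List.all_eq_true.mp hc.2 d hd)
      obtain ⟨K, hK⟩ := maxfuelB g hpre p.2.2 (fun d hd => by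
        obtain ⟨v, hv⟩ := hkidw d hd; exact ⟨v, hW d v hv⟩)
      have hsons : p.2.2.map (fun k => st.1.getD k 0) = p.2.2.map (fun d => (pvWtB g K d).getD 0) := by
        apply List.map_congr_left
        intro d hd
        obtain ⟨v, hv⟩ := hkidw d hd
        obtain ⟨v', hv'⟩ := Option.isSome_iff_exists.mp (hK d hd)
        rw [PySem.Dict.getD_of_get?_eq_some _ _ hv, hv',
          wrelB_func g hpre d v' v ⟨K, hv'⟩ (hW d v hv)]
        rfl
      have hwrel : WrelB g p.1 (p.2.1 + (p.2.2.map (fun k => st.1.getD k 0)).sum) := by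
        refine ⟨K + 1, ?_⟩
        rw [pvWtB, hlkp]
        simp only [Option.bind_some]
        rw [if_pos (List.all_eq_true.mpr (fun d hd => by simpa using hK d hd)), hsons]
      have hstep : pvPassStep st p =
          (st.1.insert p.1 (p.2.1 + (p.2.2.map (fun k => st.1.getD k 0)).sum),
           (if p.2.2 ≠ [] ∧ (PySem.Set.ofList (p.2.2.map (fun k => st.1.getD k 0))).length ≠ 1
            then false else st.2.1),
           true) := by
        rw [pvPassStep, if_pos hc]
      have hW' : WOKB g (st.1.insert p.1 (p.2.1 + (p.2.2.map (fun k => st.1.getD k 0)).sum)) := by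
        intro n v h
        rw [PySem.Dict.get?_insert] at h
        by_cases hn : n = p.1
        · subst hn; rw [if_pos rfl] at h; cases h; exact hwrel
        · rw [if_neg hn] at h; exact hW n v h
      have hB' : BOKB g (st.1.insert p.1 (p.2.1 + (p.2.2.map (fun k => st.1.getD k 0)).sum))
          (if p.2.2 ≠ [] ∧ (PySem.Set.ofList (p.2.2.map (fun k => st.1.getD k 0))).length ≠ 1
           then false else st.2.1) := by
        by_cases hbc : p.2.2 ≠ [] ∧ (PySem.Set.ofList (p.2.2.map (fun k => st.1.getD k 0))).length ≠ 1
        · rw [if_pos hbc]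
          refine ⟨fun _ => ?_, fun h => (nomatch h)⟩
          refine ⟨p.1, p.2.1, p.2.2, hlkp, hbc.1, K, hK, ?_⟩
          rw [← hsons]; exact hbc.2
        · rw [if_neg hbc]
          refine ⟨hB.1, ?_⟩
          intro hbt n v h
          rw [PySem.Dict.get?_insert] at h
          by_cases hn : n = p.1
          · subst hn
            by_cases hne : p.2.2 = []
            · rintro ⟨w', c', hl', hc', _⟩
              rw [hlkp] at hl'
              have he : p.2 = (w', c') := by injection hl'
              have h22 : p.2.2 = c' := congrArg Prod.snd he
              exact hc' (h22 ▸ hne)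
            · have h1 : (PySem.Set.ofList (p.2.2.map (fun k => st.1.getD k 0))).length = 1 := by
                by_contra hx
                exact hbc ⟨hne, hx⟩
              apply badnodeB_indep g hpre p.1 p.2.1 p.2.2 hlkp K hK
              rw [← hsons]; exact h1
          · rw [if_neg hn] at h; exact hB.2 hbt n v h
      have hmono1 : ∀ n v, st.1.get? n = some v →
          (st.1.insert p.1 (p.2.1 + (p.2.2.map (fun k => st.1.getD k 0)).sum)).get? n = some v := by
        intro n v h
        rw [PySem.Dict.get?_insert]
        by_cases hn : n = p.1
        · subst hn; rw [hc.1] at h; cases h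
        · rw [if_neg hn]; exact h
      rw [hstep]
      obtain ⟨ihW, ihB, ihM, ihP, ihF⟩ := ih (fun q hq => hl q (List.mem_cons_of_mem _ hq))
        (st.1.insert p.1 (p.2.1 + (p.2.2.map (fun k => st.1.getD k 0)).sum),
         (if p.2.2 ≠ [] ∧ (PySem.Set.ofList (p.2.2.map (fun k => st.1.getD k 0))).length ≠ 1
          then false else st.2.1),
         true) hW' hB'
      refine ⟨ihW, ihB, fun n v h => ihM n v (hmono1 n v h), ?_, ?_⟩
      · rcases ihP with h1 | h1
        · by_cases hst : st.2.2 = true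
          · left; rw [h1]; exact hst.symm
          · right
            refine ⟨p.1, hc.1, ?_, List.mem_map_of_mem hpg⟩
            exact Option.isSome_iff_exists.mpr
              ⟨_, ihM p.1 _ (PySem.Dict.get?_insert_self _ _ _)⟩
        · right
          obtain ⟨n, hn1, hn2, hn3⟩ := h1
          refine ⟨n, ?_, hn2, hn3⟩
          cases hx : st.1.get? n with
          | none => rfl
          | some v => rw [hmono1 n v hx] at hn1; cases hn1
      · intro hf
        exfalso
        obtain ⟨hfe, _⟩ := ihF hf
        rw [hfe] at hf
        simp at hf
    · have hstep : pvPassStep st p = st := by rw [pvPassStep, if_neg hc]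
      rw [hstep]
      obtain ⟨ihW, ihB, ihM, ihP, ihF⟩ := ih (fun q hq => hl q (List.mem_cons_of_mem _ hq)) st hW hB
      refine ⟨ihW, ihB, ihM, ihP, ?_⟩
      intro hf
      obtain ⟨hfe, hfall⟩ := ihF hf
      refine ⟨hfe, ?_⟩
      intro q hq hqn
      rcases List.mem_cons.mp hq with h1 | h1
      · subst h1
        by_cases hall : q.2.2.all (fun k => (st.1.get? k).isSome) = true
        · exact absurd ⟨hqn, hall⟩ hc
        · simpa using hall
      · exact hfall q h1 hqn

theorem countP_lt (w1 w2 : PySem.Dict String Int)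
    (hmono : ∀ n v, w1.get? n = some v → w2.get? n = some v)
    (n0 : String) (hnone : w1.get? n0 = none) (hsome : (w2.get? n0).isSome = true) :
    ∀ (L : List String), n0 ∈ L →
    L.countP (fun n => w2.get? n == none) < L.countP (fun n => w1.get? n == none) := by
  have himp : ∀ x, (w2.get? x == none) = true → (w1.get? x == none) = true := by
    intro x hx
    cases hw1 : w1.get? x with
    | none => rfl
    | some v => rw [hmono x v hw1] at hx; simp at hx
  intro L
  induction L with
  | nil => intro h0; simp at h0
  | cons a L' ih =>
    intro h0
    simp only [List.countP_cons]
    rcases List.mem_cons.mp h0 with h | h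
    · subst h
      have h2 : (w2.get? n0 == none) = false := by
        cases hw : w2.get? n0 with
        | none => rw [hw] at hsome; simp at hsome
        | some v => simp
      have h1 : (w1.get? n0 == none) = true := by rw [hnone]; rfl
      have hle : L'.countP (fun n => w2.get? n == none) ≤ L'.countP (fun n => w1.get? n == none) :=
        List.countP_mono_left (fun x _ hx => himp x hx)
      have e1 : (if (w1.get? n0 == none) = true then (1 : Nat) else 0) = 1 := by rw [h1]; decide
      have e2 : (if (w2.get? n0 == none) = true then (1 : Nat) else 0) = 0 := by rw [h2]; decide
      rw [e1, e2]
      omega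
    · have hrec := ih h
      have hle : (if (w2.get? a == none) = true then 1 else 0)
          ≤ (if (w1.get? a == none) = true then 1 else 0) := by
        by_cases hx : (w2.get? a == none) = true
        · rw [if_pos hx, if_pos (himp a hx)]
        · rw [if_neg hx]; omega
      omega

theorem roundsB_inv (g : List (String × Int × List String)) (hpre : Pre_check g) :
    ∀ (fuel : Nat) (wt : PySem.Dict String Int) (bal : Bool),
    WOKB g wt → BOKB g wt bal →
    (g.map (·.1)).countP (fun n => wt.get? n == none) < fuel →
    WOKB g (pvRoundsB g fuel (wt, bal)).1 ∧
    BOKB g (pvRoundsB g fuel (wt, bal)).1 (pvRoundsB g fuel (wt, bal)).2 ∧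
    (∀ p ∈ g, (pvRoundsB g fuel (wt, bal)).1.get? p.1 = none →
      p.2.2.all (fun k => ((pvRoundsB g fuel (wt, bal)).1.get? k).isSome) = false) := by
  intro fuel
  induction fuel with
  | zero => intro wt bal _ _ hcnt; omega
  | succ f ih =>
    intro wt bal hW hB hcnt
    obtain ⟨pW, pB, pM, pP, pF⟩ := passB_inv g hpre g (fun p hp => hp) (wt, bal, false) hW hB
    rcases hres : g.foldl pvPassStep (wt, bal, false) with ⟨wt', bal', prog'⟩
    rw [hres] at pW pB pM pP pF
    cases prog' with
    | false =>
      have heq : pvRoundsB g (f + 1) (wt, bal) = (wt', bal') := by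
        rw [pvRoundsB, hres]
      obtain ⟨hfe, hfall⟩ := pF rfl
      have hw : wt' = wt := congrArg (·.1) hfe
      have hb : bal' = bal := congrArg (·.2.1) hfe
      rw [heq, hw, hb]
      exact ⟨hW, hB, fun p hp hn => hfall p hp hn⟩
    | true =>
      have heq : pvRoundsB g (f + 1) (wt, bal) = pvRoundsB g f (wt', bal') := by
        rw [pvRoundsB, hres]
      rcases pP with h1 | h1
      · simp at h1
      · obtain ⟨n, hn1, hn2, hn3⟩ := h1
        have hlt := countP_lt wt wt' pM n hn1 hn2 (g.map (·.1)) hn3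
        rw [heq]
        exact ih wt' bal' pW pB (by omega)

theorem fixB_resolves (g : List (String × Int × List String)) (wtF : PySem.Dict String Int)
    (hfix : ∀ p ∈ g, wtF.get? p.1 = none → p.2.2.all (fun k => (wtF.get? k).isSome) = false) :
    ∀ (k : Nat) (n : String), (pvWtB g k n).isSome = true → (wtF.get? n).isSome = true := by
  intro k
  induction k with
  | zero => intro n h; simp [pvWtB] at h
  | succ j ih =>
    intro n h
    rw [pvWtB] at h
    cases hl : List.lookup n g with
    | none => rw [hl] at h; simp at h
    | some wc =>
      rw [hl] at h
      simp only [Option.bind_some] at h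
      by_cases hall : wc.2.all (fun d => (pvWtB g j d).isSome) = true
      · cases hget : wtF.get? n with
        | some v => rfl
        | none =>
          exfalso
          have hmem : (n, wc) ∈ g := mem_of_lookup_eq_some g n wc hl
          have hfalse := hfix (n, wc) hmem hget
          rw [List.all_eq_false] at hfalse
          obtain ⟨d, hd, hdn⟩ := hfalse
          exact hdn (by simpa using ih d (by simpa using List.all_eq_true.mp hall d hd))
      · rw [if_neg hall] at h; simp at h

theorem check_alt_iff (g : List (String × Int × List String)) (hpre : Pre_check g) :
    check_alt g = true ↔ ¬ BadB g := by
  have hW0 : WOKB g PySem.Dict.empty := by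
    intro n v h; rw [PySem.Dict.get?_empty] at h; cases h
  have hB0 : BOKB g PySem.Dict.empty true :=
    ⟨fun h => (nomatch h), fun _ n v h => by rw [PySem.Dict.get?_empty] at h; cases h⟩
  have hcnt : (g.map (·.1)).countP
      (fun n => (PySem.Dict.empty : PySem.Dict String Int).get? n == none) < g.length + 1 := by
    have h1 := List.countP_le_length
      (p := fun n => (PySem.Dict.empty : PySem.Dict String Int).get? n == none) (l := g.map (·.1))
    rw [List.length_map] at h1
    omega
  obtain ⟨rW, rB, rF⟩ := roundsB_inv g hpre (g.length + 1) PySem.Dict.empty true hW0 hB0 hcnt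
  unfold check_alt
  constructor
  · intro h hbad
    obtain ⟨n, w, c, hl, hc, K, hK, hT⟩ := hbad
    have hres : (pvWtB g (K + 1) n).isSome = true := by
      rw [pvWtB, hl]
      simp only [Option.bind_some]
      rw [if_pos (List.all_eq_true.mpr (fun d hd => by simpa using hK d hd))]
      rfl
    obtain ⟨v, hv⟩ := Option.isSome_iff_exists.mp (fixB_resolves g _ rF (K + 1) n hres)
    exact rB.2 h n v hv ⟨w, c, hl, hc, K, hK, hT⟩
  · intro h
    cases hx : (pvRoundsB g (g.length + 1) (PySem.Dict.empty, true)).2 with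
    | true => rfl
    | false => exact absurd (rB.1 hx) h

-- ===== VERDICT (by name: the statement is the Claim_ definition above) =====
theorem check_spec : Claim_equal_check := by
  intro g _ hpre
  unfold Spec_check
  have h1 := check_iff g hpre.1
  have h2 := check_alt_iff g hpre
  have h3 := Bad_iff_BadB g hpre
  cases hA : check g <;> cases hB : check_alt g <;> simp_all
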